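-- pv_equiv track=rewrite | github.com/somshekargr/nlp2.0 | nlp-search/utils/intent_search.py | search_key_by_value
-- ===== SOURCE A (Python) =====
-- def search_key_by_value(dictionary, search_value):
--     max_matched_words = 0
--     matching_key = None
--
--     for key, values in dictionary.items():
--         matched_words = sum(1 for value in values if search_value in value)
--         if search_value in values:
--              # Exact match found, return the key immediately
--             return key
--         if matched_words > max_matched_words:
--             max_matched_words = matched_words
--             matching_key = key
--
--     return matching_key
-- ===== SOURCE B (Python) =====
-- def search_key_by_value(dictionary, search_value):
--     items = list(dictionary.items())
--     # Pass 1: exact list-membership match wins immediately (first such key).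
--     exact = next((key for key, values in items if search_value in values), None)
--     if exact is not None:
--         return exact
--     # Pass 2: fold from the RIGHT building (best_count, best_key); an earlier key
--     # wins ties (c >= bc), so this yields the first key attaining the maximal
--     # substring-match count, with no carried left-to-right max state.
--     bc, bk = 0, None
--     for key, values in reversed(items):
--         c = len([v for v in values if search_value in v])
--         if c > 0 and c >= bc:
--             bc, bk = c, key
--     return bk
-- ===== Notes on version B (the rewrite author's own statement) =====
-- stated objective: alternative
-- what changed: Replaces A's single left-to-right loop with mutable max/key state and an embedded early return by two independent stages: a first-match scan for an exact list-membership hit, then a fold from the right building (best_count, best_key) with earlier-wins-ties combination, which yields the first key attaining the maximal count without A's carried running-maximum.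
import Mathlib
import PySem

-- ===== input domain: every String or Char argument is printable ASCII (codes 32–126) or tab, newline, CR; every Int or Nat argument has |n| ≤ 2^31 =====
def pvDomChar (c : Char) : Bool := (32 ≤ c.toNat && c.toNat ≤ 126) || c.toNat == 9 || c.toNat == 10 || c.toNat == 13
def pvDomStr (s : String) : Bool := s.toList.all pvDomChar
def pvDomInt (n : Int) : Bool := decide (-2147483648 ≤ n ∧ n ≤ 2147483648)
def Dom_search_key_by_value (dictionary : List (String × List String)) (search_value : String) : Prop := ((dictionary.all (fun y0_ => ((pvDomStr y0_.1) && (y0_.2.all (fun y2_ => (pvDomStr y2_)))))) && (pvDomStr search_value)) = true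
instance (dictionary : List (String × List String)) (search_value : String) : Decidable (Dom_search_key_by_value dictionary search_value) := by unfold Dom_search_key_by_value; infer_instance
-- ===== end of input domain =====

-- B replaces A's single accumulator loop (mutable max/key state with an embedded early return)
-- by two independent stages: a find-first exact-match scan, then a right-recursive fold that
-- combines head-first into (best_count, best_key); same cost, a genuinely different decomposition.


-- ===== PORT A =====
-- matched_words = sum(1 for value in values if search_value in value)
def skbvMatched (search_value : String) (values : List String) : Int :=
  values.foldl (fun acc value => if PySem.Str.isIn search_value value then acc + 1 else acc) 0

-- A's single loop, carrying (max_matched_words, matching_key) and returning early on exact match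
def skbvLoopA (search_value : String) :
    List (String × List String) → Int → Option String → Option String
  | [], _, matching_key => matching_key
  | (key, values) :: rest, max_matched_words, matching_key =>
    let matched_words := skbvMatched search_value values
    if values.contains search_value then some key
    else if matched_words > max_matched_words then
      skbvLoopA search_value rest matched_words (some key)
    else
      skbvLoopA search_value rest max_matched_words matching_key

def search_key_by_value (dictionary : List (String × List String)) (search_value : String) : Option String :=
  skbvLoopA search_value dictionary 0 none

-- ===== PORT B =====
-- pass 2 helper: the reversed-iteration fold of Source B = a fold from the right building
-- (best_count, best_key); an earlier element wins ties (c ≥ bc)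
def skbvBest (search_value : String) : List (String × List String) → Int × Option String
  | [] => (0, none)
  | (key, values) :: rest =>
    let c : Int := (values.filter (fun v => PySem.Str.isIn search_value v)).length
    let b := skbvBest search_value rest
    if c > 0 ∧ c ≥ b.1 then (c, some key) else b

-- next((key for key, values in items if search_value in values), None)
def search_key_by_value_alt (dictionary : List (String × List String)) (search_value : String) : Option String :=
  match (dictionary.find? (fun p => p.2.contains search_value)).map Prod.fst with
  | some key => some key
  | none => (skbvBest search_value dictionary).2

-- ===== PRECONDITION & SPEC =====
def Spec_search_key_by_value (dictionary : List (String × List String)) (search_value : String) (out : Option String) : Prop := out = search_key_by_value_alt dictionary search_value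
instance (dictionary : List (String × List String)) (search_value : String) (out : Option String) : Decidable (Spec_search_key_by_value dictionary search_value out) := by unfold Spec_search_key_by_value; infer_instance

-- ===== CLAIM (what is proved, stated in full; the proofs are below) =====
def Claim_equal_search_key_by_value : Prop := ∀ (dictionary : List (String × List String)) (search_value : String), Dom_search_key_by_value dictionary search_value → Spec_search_key_by_value dictionary search_value (search_key_by_value dictionary search_value)

-- ===== LEMMAS AND PROOFS =====

-- A's counting fold equals B's filter length
theorem skbvMatched_eq (sv : String) (vs : List String) :
    skbvMatched sv vs = ((vs.filter (fun v => PySem.Str.isIn sv v)).length : Int) := by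
  suffices h : ∀ (l : List String) (acc : Int),
      l.foldl (fun acc value => if PySem.Str.isIn sv value then acc + 1 else acc) acc
        = acc + ((l.filter (fun v => PySem.Str.isIn sv v)).length : Int) by
    simpa [skbvMatched] using h vs 0
  intro l
  induction l with
  | nil => intro acc; simp
  | cons x xs ih =>
    intro acc
    rw [List.foldl_cons, List.filter_cons]
    by_cases hx : PySem.Str.isIn sv x = true
    · rw [if_pos hx, if_pos hx, ih, List.length_cons]; push_cast; ring
    · rw [if_neg hx, if_neg hx, ih]

theorem skbvBest_nonneg (sv : String) (l : List (String × List String)) :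
    0 ≤ (skbvBest sv l).1 := by
  induction l with
  | nil => simp [skbvBest]
  | cons p rest ih =>
    obtain ⟨key, values⟩ := p
    simp only [skbvBest]
    split
    · omega
    · exact ih

-- when the best count is 0, no key was ever recorded
theorem skbvBest_zero_none (sv : String) (l : List (String × List String)) :
    (skbvBest sv l).1 = 0 → (skbvBest sv l).2 = none := by
  induction l with
  | nil => simp [skbvBest]
  | cons p rest ih =>
    obtain ⟨key, values⟩ := p
    simp only [skbvBest]
    split
    · omega
    · exact ih

-- A's interleaved loop = B's two stages, for any carried state with 0 ≤ m
theorem skbvLoopA_eq (sv : String) :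
    ∀ (l : List (String × List String)) (m : Int) (mk : Option String), 0 ≤ m →
      skbvLoopA sv l m mk =
        match (l.find? (fun p => p.2.contains sv)).map Prod.fst with
        | some key => some key
        | none => if (skbvBest sv l).1 > m then (skbvBest sv l).2 else mk := by
  intro l
  induction l with
  | nil => intro m mk hm; simp [skbvLoopA, skbvBest]; omega
  | cons p rest ih =>
    intro m mk hm
    obtain ⟨key, values⟩ := p
    by_cases hex : values.contains sv
    · have hex' : sv ∈ values := by simpa using hex
      simp [skbvLoopA, hex']
    · have hc : skbvMatched sv values
          = ((values.filter (fun v => PySem.Str.isIn sv v)).length : Int) := skbvMatched_eq sv values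
      have hc0 : 0 ≤ skbvMatched sv values := by rw [hc]; positivity
      have hb0 := skbvBest_nonneg sv rest
      simp only [skbvLoopA, List.find?_cons, hex, Bool.false_eq_true, if_false]
      by_cases hgt : skbvMatched sv values > m
      · rw [if_pos hgt, ih (skbvMatched sv values) (some key) hc0]
        cases hfind : (rest.find? (fun p => p.2.contains sv)).map Prod.fst with
        | some k => simp
        | none =>
          simp only [skbvBest, ← hc]
          by_cases hge : skbvMatched sv values > 0 ∧ (skbvBest sv rest).1 ≤ skbvMatched sv values
          · rw [if_pos hge]
            dsimp only
            split_ifs <;> first | rfl | omega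
          · have hc1 : skbvMatched sv values > 0 := by omega
            have hbr : skbvMatched sv values < (skbvBest sv rest).1 := by
              by_contra hle; exact hge ⟨hc1, by omega⟩
            rw [if_neg hge]
            split_ifs <;> first | rfl | omega
      · rw [if_neg hgt, ih m mk hm]
        cases hfind : (rest.find? (fun p => p.2.contains sv)).map Prod.fst with
        | some k => simp
        | none =>
          simp only [skbvBest, ← hc]
          by_cases hge : skbvMatched sv values > 0 ∧ (skbvBest sv rest).1 ≤ skbvMatched sv values
          · rw [if_pos hge]
            dsimp only
            split_ifs <;> first | rfl | omega
          · rw [if_neg hge]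

-- ===== VERDICT (by name: the statement is the Claim_ definition above) =====
theorem search_key_by_value_spec : Claim_equal_search_key_by_value := by
  intro dictionary search_value _
  unfold Spec_search_key_by_value search_key_by_value search_key_by_value_alt
  rw [skbvLoopA_eq search_value dictionary 0 none le_rfl]
  cases hfind : (dictionary.find? (fun p => p.2.contains search_value)).map Prod.fst with
  | some k => simp
  | none =>
    by_cases h : (skbvBest search_value dictionary).1 > 0
    · rw [if_pos h]
    · rw [if_neg h]
      have hb0 := skbvBest_nonneg search_value dictionary
      exact (skbvBest_zero_none search_value dictionary (by omega)).symm
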